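-- pv_equiv track=rewrite | github.com/Cpos64/virtue-journal | tools/journal.py | replace_bullets_under_question
-- ===== SOURCE A (Python) =====
-- def replace_bullets_under_question(text: str, question_phrase: str, items: list[str]) -> str:
--     """
--     Find the line containing `question_phrase`, then replace the markdown bullet list
--     immediately below it with `items` formatted as "- ...".
--
--     Stops replacing when it hits a non-bullet line.
--     """
--     lines = text.splitlines(True)
--
--     for i, line in enumerate(lines):
--         if question_phrase in line:
--             j = i + 1
--
--             # Skip and remove existing bullet lines under the question
--             while j < len(lines) and lines[j].lstrip().startswith("-"):
--                 j += 1
--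
--             bullet_lines = [f"- {it}\n" for it in items]
--             new_lines = lines[: i + 1] + bullet_lines + lines[j:]
--             return "".join(new_lines)
--
--     raise ValueError(f"Could not find question line containing: {question_phrase}")
-- ===== SOURCE B (Python) =====
-- def replace_bullets_under_question(text: str, question_phrase: str, items: list[str]) -> str:
--     """Single streaming pass: copy lines, on the first matching line emit the new
--     bullets and skip the old bullet block; no index search or slicing."""
--     out = []
--     replaced = False
--     skipping = False
--     for line in text.splitlines(True):
--         if skipping and line.lstrip().startswith("-"):
--             continue
--         if not replaced and question_phrase in line:
--             out.append(line)
--             out.extend(f"- {it}\n" for it in items)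
--             replaced = True
--             skipping = True
--         else:
--             out.append(line)
--             skipping = False
--     if not replaced:
--         raise ValueError(f"Could not find question line containing: {question_phrase}")
--     return "".join(out)
-- ===== Notes on version B (the rewrite author's own statement) =====
-- stated objective: alternative
-- what changed: Replaced the find-index-then-slice construction (enumerate to locate the question line, a while loop to find the end of the bullet block, then three list slices concatenated) with a single streaming state-machine pass that emits output line by line, using replaced/skipping flags to insert the new bullets and drop the old ones.
import Mathlib
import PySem

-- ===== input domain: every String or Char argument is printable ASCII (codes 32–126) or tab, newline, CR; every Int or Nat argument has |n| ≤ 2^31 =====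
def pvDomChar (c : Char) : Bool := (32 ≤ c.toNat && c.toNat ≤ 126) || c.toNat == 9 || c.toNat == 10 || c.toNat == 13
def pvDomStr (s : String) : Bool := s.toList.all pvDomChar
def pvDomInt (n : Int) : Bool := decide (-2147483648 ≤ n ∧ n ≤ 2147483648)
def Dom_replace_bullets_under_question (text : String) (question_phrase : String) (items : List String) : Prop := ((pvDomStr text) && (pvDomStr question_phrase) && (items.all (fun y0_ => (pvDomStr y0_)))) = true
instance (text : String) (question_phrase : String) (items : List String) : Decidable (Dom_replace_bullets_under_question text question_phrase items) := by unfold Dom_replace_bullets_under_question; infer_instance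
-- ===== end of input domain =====

-- B replaces A's find-index/while/slice construction with a single streaming state-machine
-- pass over the lines; proved to return the same string wherever A returns (Pre_ excludes
-- the inputs where A raises ValueError: no line contains the phrase).


-- text.splitlines(True) (keepends), ported by hand: exact on Dom, where the only possible
-- line terminators are '\n', '\r' and '\r\n' (Python's extra terminators \v \f \x1c… are
-- outside Dom's character set).
def pvSplitKE : List Char → List (List Char)
  | [] => []
  | '\r' :: '\n' :: rest => ['\r', '\n'] :: pvSplitKE rest
  | '\n' :: rest => ['\n'] :: pvSplitKE rest
  | '\r' :: rest => ['\r'] :: pvSplitKE rest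
  | c :: rest =>
    match pvSplitKE rest with
    | [] => [[c]]
    | l :: ls => (c :: l) :: ls

-- shared by both ports (the same source expression in both Pythons):
-- line.lstrip().startswith("-")
def pvIsBullet (l : String) : Bool := PySem.Str.startswith (PySem.Str.lstrip l) "-"

-- ===== PORT A =====
-- the while loop 'while j < len(lines) and lines[j].lstrip().startswith("-"): j += 1'
-- (the suffix lines[j:] it leaves behind)
def pvDropBulletsA : List String → List String
  | [] => []
  | l :: rest => if pvIsBullet l then pvDropBulletsA rest else l :: rest

-- the 'for i, line in enumerate(lines)' loop: on the first line containing the phrase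
-- return lines[:i+1] + bullet_lines + lines[j:] (the prefix is the lines already passed);
-- none = the loop falls through and A raises ValueError.
def pvFindA (phrase : String) (bullets : List String) : List String → Option (List String)
  | [] => none
  | l :: rest =>
    if PySem.Str.isIn phrase l then some (l :: (bullets ++ pvDropBulletsA rest))
    else (pvFindA phrase bullets rest).map (l :: ·)

def replace_bullets_under_question (text : String) (question_phrase : String) (items : List String) : String :=
  let lines := (pvSplitKE text.toList).map String.ofList
  let bullet_lines := items.map (fun it => String.ofList ('-' :: ' ' :: (it.toList ++ ['\n'])))
  match pvFindA question_phrase bullet_lines lines with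
  | some new_lines => PySem.Str.join "" new_lines
  | none => ""  -- A raises ValueError here; excluded by Pre_

-- ===== PORT B =====
-- the streaming loop of Source B: state = (out, replaced, skipping)
def pvLoopB (phrase : String) (bullets : List String) :
    List String → Bool → Bool → List String → List String × Bool
  | [], replaced, _, out => (out, replaced)
  | l :: rest, replaced, skipping, out =>
    if skipping && pvIsBullet l then pvLoopB phrase bullets rest replaced true out
    else if !replaced && PySem.Str.isIn phrase l then
      pvLoopB phrase bullets rest true true (out ++ (l :: bullets))
    else pvLoopB phrase bullets rest replaced false (out ++ [l])

def replace_bullets_under_question_alt (text : String) (question_phrase : String) (items : List String) : String :=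
  let bullets := items.map (fun it => String.ofList ('-' :: ' ' :: (it.toList ++ ['\n'])))
  let r := pvLoopB question_phrase bullets ((pvSplitKE text.toList).map String.ofList) false false []
  if r.2 then PySem.Str.join "" r.1
  else ""  -- Source B raises ValueError here; excluded by Pre_

-- ===== PRECONDITION & SPEC =====
-- Pre_: some line of the text contains the phrase — exactly the inputs on which A
-- returns instead of raising ValueError.  pvSplitKE here is the line decomposition of
-- the INPUT (= Python's text.splitlines(True), a primitive PySem lacks), used as a
-- membership condition over the text's lines — not a re-simulation of either port's
-- search loop.
def Pre_replace_bullets_under_question (text : String) (question_phrase : String) (items : List String) : Prop :=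
  ((pvSplitKE text.toList).map String.ofList).any (fun l => PySem.Str.isIn question_phrase l) = true
instance (text : String) (question_phrase : String) (items : List String) : Decidable (Pre_replace_bullets_under_question text question_phrase items) := by unfold Pre_replace_bullets_under_question; infer_instance

def pvWitness_replace_bullets_under_question : String × String × List String :=
  ("Mood?\n- old1\n- old2\nEnd\n", "Mood?", ["calm", "tired"])

def Spec_replace_bullets_under_question (text : String) (question_phrase : String) (items : List String) (out : String) : Prop := out = replace_bullets_under_question_alt text question_phrase items
instance (text : String) (question_phrase : String) (items : List String) (out : String) : Decidable (Spec_replace_bullets_under_question text question_phrase items out) := by unfold Spec_replace_bullets_under_question; infer_instance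

-- ===== CLAIM (what is proved, stated in full; the proofs are below) =====
def Claim_equal_replace_bullets_under_question : Prop := ∀ (text : String) (question_phrase : String) (items : List String), Dom_replace_bullets_under_question text question_phrase items → Pre_replace_bullets_under_question text question_phrase items → Spec_replace_bullets_under_question text question_phrase items (replace_bullets_under_question text question_phrase items)

-- ===== LEMMAS AND PROOFS =====

-- after the replacement, out of skip mode, B copies the rest of the lines unchanged
theorem pvLoopB_done (phrase : String) (bullets : List String) :
    ∀ (lines out : List String),
      pvLoopB phrase bullets lines true false out = (out ++ lines, true) := by
  intro lines
  induction lines with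
  | nil => intro out; simp [pvLoopB]
  | cons l rest ih => intro out; simp [pvLoopB, ih]

-- in skip mode after the replacement, B drops exactly the bullet block A's while loop skips
theorem pvLoopB_skip (phrase : String) (bullets : List String) :
    ∀ (lines out : List String),
      pvLoopB phrase bullets lines true true out = (out ++ pvDropBulletsA lines, true) := by
  intro lines
  induction lines with
  | nil => intro out; simp [pvLoopB, pvDropBulletsA]
  | cons l rest ih =>
    intro out
    by_cases hb : pvIsBullet l = true
    · simp [pvLoopB, pvDropBulletsA, hb, ih]
    · simp [pvLoopB, pvDropBulletsA, hb, pvLoopB_done]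

-- the main invariant: before any match, B's streaming pass computes A's find-and-splice
theorem pvLoopB_search (phrase : String) (bullets : List String) :
    ∀ (lines out : List String),
      pvLoopB phrase bullets lines false false out =
        match pvFindA phrase bullets lines with
        | some nl => (out ++ nl, true)
        | none => (out ++ lines, false) := by
  intro lines
  induction lines with
  | nil => intro out; simp [pvLoopB, pvFindA]
  | cons l rest ih =>
    intro out
    unfold pvLoopB pvFindA
    simp only [Bool.false_and, Bool.false_eq_true, if_false, Bool.not_false, Bool.true_and]
    by_cases hm : PySem.Str.isIn phrase l = true
    · rw [if_pos hm, if_pos hm, pvLoopB_skip]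
      simp
    · rw [if_neg hm, if_neg hm, ih (out ++ [l])]
      cases pvFindA phrase bullets rest <;> simp

-- Pre_ guarantees the search succeeds
theorem pvFindA_isSome (phrase : String) (bullets : List String) :
    ∀ (lines : List String),
      lines.any (fun l => PySem.Str.isIn phrase l) = true →
      ∃ nl, pvFindA phrase bullets lines = some nl := by
  intro lines
  induction lines with
  | nil => intro h; simp at h
  | cons l rest ih =>
    intro h
    by_cases hm : PySem.Str.isIn phrase l = true
    · exact ⟨_, by unfold pvFindA; rw [if_pos hm]⟩
    · have hm0 : PySem.Str.isIn phrase l = false := by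
        revert hm; cases PySem.Str.isIn phrase l <;> simp
      rw [List.any_cons, hm0, Bool.false_or] at h
      obtain ⟨nl, hnl⟩ := ih h
      refine ⟨l :: nl, ?_⟩
      unfold pvFindA
      rw [if_neg hm, hnl]
      rfl

-- ===== VERDICT (by name: the statement is the Claim_ definition above) =====
theorem replace_bullets_under_question_spec : Claim_equal_replace_bullets_under_question := by
  intro text qp items _ hpre
  unfold Spec_replace_bullets_under_question
  unfold Pre_replace_bullets_under_question at hpre
  unfold replace_bullets_under_question replace_bullets_under_question_alt
  obtain ⟨nl, hnl⟩ := pvFindA_isSome qp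
    (items.map (fun it => String.ofList ('-' :: ' ' :: (it.toList ++ ['\n']))))
    ((pvSplitKE text.toList).map String.ofList) hpre
  simp [pvLoopB_search, hnl]
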